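-- pv_equiv track=rewrite | github.com/RizwanMolla/GfG-POTD | Largest number in one swap/solution.py | largestSwap
-- ===== SOURCE A (Python) =====
-- def largestSwap(s):
--     #code here
--     s = list(s)
--     n = len(s)
--
--     last_pos = {ch: i for i, ch in enumerate(s)}
--
--     for i in range(n):
--         for d in range(9, int(s[i]), -1):
--             d = str(d)
--             if d in last_pos and last_pos[d] > i:
--                 s[i], s[last_pos[d]] = s[last_pos[d]], s[i]
--                 return "".join(s)
--
--     return "".join(s)
-- ===== SOURCE B (Python) =====
-- def largestSwap(s):
--     # one right-to-left pass builds best[i] = index (after i) of the rightmost largest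
--     # digit character occurring after position i (-1 if none); then one forward scan.
--     n = len(s)
--     best = [-1] * n
--     b = -1
--     for i in range(n - 1, -1, -1):
--         best[i] = b
--         c = s[i]
--         if c.isdigit() and (b == -1 or c > s[b]):
--             b = i
--     for i in range(n):
--         v = int(s[i])
--         j = best[i]
--         if j != -1 and int(s[j]) > v:
--             out = list(s)
--             out[i], out[j] = out[j], out[i]
--             return "".join(out)
--     return s
-- ===== Notes on version B (the rewrite author's own statement) =====
-- stated objective: alternative
-- what changed: Replaces A's digit->last-index dict plus a per-position scan over digits 9..int(s[i])+1 by a right-to-left pass that builds a suffix rightmost-largest-digit index array followed by one forward scan.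
import Mathlib
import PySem

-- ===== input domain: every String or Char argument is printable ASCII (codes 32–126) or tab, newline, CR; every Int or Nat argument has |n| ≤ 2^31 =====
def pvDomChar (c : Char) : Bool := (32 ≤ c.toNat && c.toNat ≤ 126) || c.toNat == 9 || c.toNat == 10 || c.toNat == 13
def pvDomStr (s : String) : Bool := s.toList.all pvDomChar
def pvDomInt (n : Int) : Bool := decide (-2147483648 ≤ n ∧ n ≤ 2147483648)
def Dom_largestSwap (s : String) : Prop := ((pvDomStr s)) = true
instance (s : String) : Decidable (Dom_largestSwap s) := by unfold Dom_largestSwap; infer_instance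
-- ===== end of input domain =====

-- B replaces A's digit->last-index dict plus a per-position scan over digits 9..int(s[i])+1 by a
-- right-to-left pass building a suffix "rightmost largest digit after i" index array and one forward scan
-- (objective: alternative single-pass-per-direction algorithm).

-- digit value of a character, int(c) for a digit character c
def pvDigVal (c : Char) : Int := (c.toNat : Int) - 48
-- str(d) for d in 0..9
def pvChrD (d : Int) : Char := Char.ofNat (48 + d.toNat)
-- Python's simultaneous swap s[i], s[j] = s[j], s[i] (both indices are in range and nonnegative when used)
def pvSwap (l : List Char) (i j : Int) : List Char :=
  let ci := PySem.List.pyGetD l i ' '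
  let cj := PySem.List.pyGetD l j ' '
  (l.set i.toNat cj).set j.toNat ci

-- ===== PORT A =====
-- last_pos = {ch: i for i, ch in enumerate(s)}
def pvLastPos (l : List Char) : PySem.Dict Char Int :=
  (PySem.List.enumerate l 0).foldl (fun d p => d.insert p.2 p.1) PySem.Dict.empty

-- inner loop: for d in range(9, int(s[i]), -1): if str(d) in last_pos and last_pos[str(d)] > i: return that index
def pvInnerA (lp : PySem.Dict Char Int) (i : Int) : List Int → Option Int
  | [] => none
  | d :: ds =>
    match lp.get? (pvChrD d) with
    | some j => if i < j then some j else pvInnerA lp i ds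
    | none => pvInnerA lp i ds

-- outer loop: for i in range(n): ... ; return "".join(s) when a swap fires or after the loop
def pvOuterA (l : List Char) (lp : PySem.Dict Char Int) : List Int → String
  | [] => String.ofList l
  | i :: is =>
    match pvInnerA lp i (PySem.List.pyRange 9 (pvDigVal (PySem.List.pyGetD l i ' ')) (-1)) with
    | some j => String.ofList (pvSwap l i j)
    | none => pvOuterA l lp is

def largestSwap (s : String) : String :=
  let l := s.toList
  let n := l.length
  let lp := pvLastPos l
  pvOuterA l lp (PySem.List.pyRange 0 (n : Int) 1)

-- ===== PORT B =====
-- first loop of Source B: for i in range(n-1, -1, -1): best[i] = b; update b on a strictly larger digit char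
def pvBuildBest (l : List Char) : List Int → List Int × Int → List Int × Int
  | [], st => st
  | i :: is, (best, b) =>
    let best' := best.set i.toNat b
    let c := PySem.List.pyGetD l i ' '
    if PySem.Chars.isdigit c && ((b == -1) || decide (PySem.List.pyGetD l b ' ' < c)) then
      pvBuildBest l is (best', i)
    else
      pvBuildBest l is (best', b)

-- second loop of Source B: forward scan, swap at the first position improvable by its suffix best
def pvScanB (s0 : String) (l : List Char) (best : List Int) : List Int → String
  | [] => s0
  | i :: is =>
    let v := pvDigVal (PySem.List.pyGetD l i ' ')
    let j := PySem.List.pyGetD best i (-1)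
    if j ≠ -1 ∧ v < pvDigVal (PySem.List.pyGetD l j ' ') then
      String.ofList (pvSwap l i j)
    else
      pvScanB s0 l best is

def largestSwap_alt (s : String) : String :=
  let n := PySem.Str.len s
  let l := s.toList
  match pvBuildBest l (PySem.List.pyRange (n - 1) (-1) (-1)) (List.replicate n.toNat (-1), -1) with
  | (best, _) => pvScanB s l best (PySem.List.pyRange 0 n 1)

-- ===== PRECONDITION & SPEC =====
-- Pre_ is exactly the set of inputs on which A (and B) returns instead of raising ValueError at
-- int(s[i]): either every character is a digit, or some position i has an all-digit prefix and a
-- strictly larger digit somewhere after it (then the swap fires before a non-digit is scanned).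
def Pre_largestSwap (s : String) : Prop :=
  (s.toList.all PySem.Chars.isdigit ||
   (List.range s.toList.length).any (fun i =>
     ((List.range (i+1)).all fun k => PySem.Chars.isdigit (s.toList.getD k ' ')) &&
     ((List.range s.toList.length).any fun m =>
        decide (i < m) && PySem.Chars.isdigit (s.toList.getD m ' ') &&
        decide (s.toList.getD i ' ' < s.toList.getD m ' ')))) = true
instance (s : String) : Decidable (Pre_largestSwap s) := by unfold Pre_largestSwap; infer_instance
def pvWitness_largestSwap : String := "2736"

def Spec_largestSwap (s : String) (out : String) : Prop := out = largestSwap_alt s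
instance (s : String) (out : String) : Decidable (Spec_largestSwap s out) := by unfold Spec_largestSwap; infer_instance

-- ===== CLAIM (what is proved, stated in full; the proofs are below) =====
def Claim_equal_largestSwap : Prop := ∀ (s : String), Dom_largestSwap s → Pre_largestSwap s → Spec_largestSwap s (largestSwap s)

-- ===== LEMMAS AND PROOFS =====

-- digit value at a Nat index (canonical form used by the proofs)
def pvV (l : List Char) (k : Nat) : Int := pvDigVal (l.getD k ' ')

-- position k holds a digit character
def pvDigAt (l : List Char) (k : Nat) : Prop := 48 ≤ (l.getD k ' ').toNat ∧ (l.getD k ' ').toNat ≤ 57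

-- "some later digit position holds a strictly larger value"
def pvGood (l : List Char) (k : Nat) : Prop :=
  ∃ m, k < m ∧ m < l.length ∧ pvDigAt l m ∧ pvV l k < pvV l m

-- j is the rightmost digit position of maximal digit value among positions in [t, l.length)
def pvRArg (l : List Char) (t : Nat) (j : Nat) : Prop :=
  t ≤ j ∧ j < l.length ∧ pvDigAt l j ∧
    (∀ k, t ≤ k → k < l.length → pvDigAt l k → pvV l k ≤ pvV l j) ∧
    (∀ k, j < k → k < l.length → pvDigAt l k → pvV l k < pvV l j)

lemma pvCharLt (x y : Char) : x < y ↔ x.toNat < y.toNat := by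
  rw [Char.lt_def]
  exact UInt32.lt_iff_toNat_lt

lemma pvCharLt_V (l : List Char) (a b : Nat) :
    l.getD a ' ' < l.getD b ' ' ↔ pvV l a < pvV l b := by
  rw [pvCharLt]
  unfold pvV pvDigVal
  omega

lemma pvIsdigit_iff (l : List Char) (k : Nat) :
    PySem.Chars.isdigit (l.getD k ' ') = true ↔ pvDigAt l k := by
  unfold PySem.Chars.isdigit pvDigAt
  simp [Char.le_def]
  constructor
  · rintro ⟨h1, h2⟩; exact ⟨h1, h2⟩
  · rintro ⟨h1, h2⟩; exact ⟨h1, h2⟩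

lemma pvDigAt_bounds {l : List Char} {k : Nat} (h : pvDigAt l k) :
    0 ≤ pvV l k ∧ pvV l k ≤ 9 := by
  unfold pvDigAt at h
  unfold pvV pvDigVal
  omega

lemma pvChrD_toNat (d : Int) (hd : 0 ≤ d) (hd9 : d ≤ 9) :
    (pvChrD d).toNat = 48 + d.toNat := by
  unfold pvChrD
  unfold Char.ofNat
  split
  · simp [Char.toNat, Char.ofNatAux]; omega
  · omega

lemma pvChrD_pvV {l : List Char} {k : Nat} (h : pvDigAt l k) :
    pvChrD (pvV l k) = l.getD k ' ' := by
  unfold pvDigAt at h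
  unfold pvChrD pvV pvDigVal
  have : (48 + ((((l.getD k ' ').toNat : Int)) - 48).toNat) = (l.getD k ' ').toNat := by omega
  rw [this, Char.ofNat_toNat]

lemma pvV_of_chr {l : List Char} {k : Nat} {d : Int}
    (hd : 0 ≤ d) (hd9 : d ≤ 9) (he : l.getD k ' ' = pvChrD d) :
    pvV l k = d ∧ pvDigAt l k := by
  have ht : (l.getD k ' ').toNat = 48 + d.toNat := by rw [he]; exact pvChrD_toNat d hd hd9
  unfold pvV pvDigVal pvDigAt
  omega

lemma pvRArg_unique {l : List Char} {t j1 j2 : Nat}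
    (h1 : pvRArg l t j1) (h2 : pvRArg l t j2) : j1 = j2 := by
  obtain ⟨ht1, hn1, hd1, hmax1, hright1⟩ := h1
  obtain ⟨ht2, hn2, hd2, hmax2, hright2⟩ := h2
  rcases Nat.lt_trichotomy j1 j2 with h | h | h
  · have := hright1 j2 h hn2 hd2
    have := hmax2 j1 ht1 hn1 hd1
    omega
  · exact h
  · have := hright2 j1 h hn1 hd1
    have := hmax1 j2 ht2 hn2 hd2
    omega

-- ---- last_pos of A ----

lemma pvLastPos_append (l : List Char) (x : Char) :
    pvLastPos (l ++ [x]) = (pvLastPos l).insert x (l.length : Int) := by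
  unfold pvLastPos
  rw [PySem.List.enumerate_append, List.foldl_append]
  simp [PySem.List.enumerate]

lemma pvLastPos_sound (l : List Char) (c : Char) (j : Int) (h : (pvLastPos l).get? c = some j) :
    0 ≤ j ∧ j.toNat < l.length ∧ l.getD j.toNat ' ' = c ∧
      ∀ k, j.toNat < k → k < l.length → l.getD k ' ' ≠ c := by
  induction l using List.reverseRecOn generalizing j with
  | nil => simp [pvLastPos, PySem.List.enumerate, PySem.Dict.get?_empty] at h
  | append_singleton l x ih =>
    rw [pvLastPos_append, PySem.Dict.get?_insert] at h
    by_cases hc : c = x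
    · subst hc
      simp at h
      subst h
      refine ⟨by positivity, by simp, by simp, ?_⟩
      intro k hk1 hk2
      simp at hk1 hk2
      omega
    · rw [if_neg hc] at h
      obtain ⟨h0, h1, h2, h3⟩ := ih j h
      refine ⟨h0, by simp; omega, ?_, ?_⟩
      · rw [List.getD_append _ _ _ _ h1]; exact h2
      · intro k hk1 hk2
        simp at hk2
        rcases Nat.lt_or_ge k l.length with hlt | hge
        · rw [List.getD_append _ _ _ _ hlt]; exact h3 k hk1 hlt
        · have : k = l.length := by omega
          subst this
          simp [Ne.symm hc]

lemma pvLastPos_complete (l : List Char) (k : Nat) (hk : k < l.length) :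
    ∃ j : Int, (pvLastPos l).get? (l.getD k ' ') = some j ∧ (k : Int) ≤ j := by
  induction l using List.reverseRecOn with
  | nil => simp at hk
  | append_singleton l x ih =>
    rw [pvLastPos_append, PySem.Dict.get?_insert]
    rcases Nat.lt_or_ge k l.length with hlt | hge
    · rw [List.getD_append _ _ _ _ hlt]
      by_cases hc : l.getD k ' ' = x
      · exact ⟨l.length, by rw [if_pos hc], by exact_mod_cast Nat.le_of_lt hlt⟩
      · obtain ⟨j, hj, hkj⟩ := ih hlt
        exact ⟨j, by rw [if_neg hc]; exact hj, hkj⟩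
    · have : k = l.length := by simp at hk; omega
      subst this
      have hx : (l ++ [x]).getD l.length ' ' = x := by simp
      rw [hx, if_pos rfl]
      exact ⟨l.length, rfl, le_refl _⟩

-- ---- inner loop of A ----

lemma pvInnerA_cons_fail (lp : PySem.Dict Char Int) (i d : Int) (ds : List Int)
    (h : ∀ j, lp.get? (pvChrD d) = some j → ¬ i < j) :
    pvInnerA lp i (d :: ds) = pvInnerA lp i ds := by
  simp only [pvInnerA]
  cases hg : lp.get? (pvChrD d) with
  | none => rfl
  | some j => simp [h j hg]

lemma pvInnerA_none (lp : PySem.Dict Char Int) (i : Int) (ds : List Int)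
    (h : ∀ d ∈ ds, ∀ j, lp.get? (pvChrD d) = some j → ¬ i < j) :
    pvInnerA lp i ds = none := by
  induction ds with
  | nil => rfl
  | cons d ds ih =>
    rw [pvInnerA_cons_fail lp i d ds (h d (by simp))]
    exact ih (fun d' hd' => h d' (by simp [hd']))

lemma pvInnerA_skip (lp : PySem.Dict Char Int) (i : Int) (hD M t : Int)
    (h1 : t ≤ M) (h2 : M ≤ hD)
    (h : ∀ d, M < d → d ≤ hD → ∀ j, lp.get? (pvChrD d) = some j → ¬ i < j) :
    pvInnerA lp i (PySem.List.pyRange hD t (-1)) = pvInnerA lp i (PySem.List.pyRange M t (-1)) := by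
  have hk : ∃ k : Nat, hD - M = (k : Int) := ⟨(hD - M).toNat, by omega⟩
  obtain ⟨k, hkk⟩ := hk
  induction k generalizing hD with
  | zero => have : hD = M := by omega
            subst this; rfl
  | succ k ih =>
    rw [PySem.List.pyRange_neg_one_cons (by omega : t < hD)]
    rw [pvInnerA_cons_fail lp i hD _ (h hD (by omega) le_rfl)]
    exact ih (hD - 1) (by omega) (fun d hd1 hd2 => h d hd1 (by omega)) (by omega)

lemma pvInnerA_correct_none {l : List Char} (i : Nat) (_hi : i < l.length)
    (hdi : pvDigAt l i) (hng : ¬ pvGood l i) :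
    pvInnerA (pvLastPos l) (i : Int) (PySem.List.pyRange 9 (pvV l i) (-1)) = none := by
  apply pvInnerA_none
  intro d hd j hj hij
  have hdm := PySem.List.mem_pyRange_neg_one.mp hd
  obtain ⟨h0, h1, h2, h3⟩ := pvLastPos_sound l (pvChrD d) j hj
  have hvb := pvDigAt_bounds hdi
  obtain ⟨hvj, hdj⟩ := pvV_of_chr (by omega) (by omega) h2
  exact hng ⟨j.toNat, by omega, h1, hdj, by omega⟩

lemma pvInnerA_correct_some {l : List Char} (i j0 : Nat) (_hi : i < l.length)
    (hdi : pvDigAt l i) (hR : pvRArg l (i+1) j0) (hlt : pvV l i < pvV l j0) :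
    pvInnerA (pvLastPos l) (i : Int) (PySem.List.pyRange 9 (pvV l i) (-1)) = some (j0 : Int) := by
  obtain ⟨hj1, hj2, hdj0, hmax, hright⟩ := hR
  have hbi := pvDigAt_bounds hdi
  have hbj := pvDigAt_bounds hdj0
  rw [pvInnerA_skip _ _ 9 (pvV l j0) (pvV l i) (by omega) (by omega) ?later]
  case later =>
    intro d hd1 hd2 j hj hij
    obtain ⟨h0, h1, h2, h3⟩ := pvLastPos_sound l (pvChrD d) j hj
    obtain ⟨hvj, hdj⟩ := pvV_of_chr (by omega) (by omega) h2
    have := hmax j.toNat (by omega) h1 hdj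
    omega
  rw [PySem.List.pyRange_neg_one_cons (by omega : pvV l i < pvV l j0)]
  obtain ⟨j, hj, hj0j⟩ := pvLastPos_complete l j0 hj2
  obtain ⟨h0, h1, h2, h3⟩ := pvLastPos_sound l (l.getD j0 ' ') j hj
  have hvj : pvV l j.toNat = pvV l j0 := by
    unfold pvV; rw [h2]
  have hdj : pvDigAt l j.toNat := by
    unfold pvDigAt at hdj0 ⊢; rw [h2]; exact hdj0
  have hjeq : j = (j0 : Int) := by
    rcases Nat.lt_or_ge j0 j.toNat with hlt2 | hge
    · have := hright j.toNat hlt2 h1 hdj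
      omega
    · omega
  subst hjeq
  simp only [pvInnerA]
  rw [pvChrD_pvV hdj0, hj]
  have hij : (i : Int) < (j0 : Int) := by omega
  simp [hij]

-- ---- outer loop of A ----

lemma pvOuterA_none {l : List Char}
    (hall : ∀ k, k < l.length → pvDigAt l k ∧ ¬ pvGood l k) (i : Nat) :
    pvOuterA l (pvLastPos l) (PySem.List.pyRange (i : Int) (l.length : Int) 1) = String.ofList l := by
  have hk : ∃ k : Nat, (l.length : Int) - i ≤ (k : Int) := ⟨l.length, by omega⟩
  obtain ⟨k, hkk⟩ := hk
  induction k generalizing i with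
  | zero =>
    rw [PySem.List.pyRange_one_eq_nil (by omega)]
    rfl
  | succ k ih =>
    rcases Nat.lt_or_ge i l.length with hlt | hge
    · rw [PySem.List.pyRange_one_cons (by omega)]
      unfold pvOuterA
      rw [PySem.List.pyGetD_natCast]
      rw [show pvDigVal (l.getD i ' ') = pvV l i from rfl]
      rw [pvInnerA_correct_none i hlt (hall i hlt).1 (hall i hlt).2]
      have : (i : Int) + 1 = ((i + 1 : Nat) : Int) := by omega
      rw [this]
      exact ih (i+1) (by omega)
    · rw [PySem.List.pyRange_one_eq_nil (by omega)]
      rfl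

lemma pvOuterA_some {l : List Char} (i0 j0 : Nat)
    (hmin : ∀ k, k < i0 → ¬ pvGood l k) (hpref : ∀ k, k ≤ i0 → pvDigAt l k)
    (hg : pvGood l i0) (hR : pvRArg l (i0+1) j0)
    (i : Nat) (hii : i ≤ i0) :
    pvOuterA l (pvLastPos l) (PySem.List.pyRange (i : Int) (l.length : Int) 1) =
      String.ofList (pvSwap l (i0 : Int) (j0 : Int)) := by
  have hi0n : i0 < l.length := by
    obtain ⟨m, hm1, hm2, _⟩ := hg
    omega
  have hk : ∃ k : Nat, i0 - i ≤ k := ⟨i0, by omega⟩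
  obtain ⟨k, hkk⟩ := hk
  induction k generalizing i with
  | zero =>
    have : i = i0 := by omega
    subst this
    rw [PySem.List.pyRange_one_cons (by omega)]
    unfold pvOuterA
    rw [PySem.List.pyGetD_natCast]
    rw [show pvDigVal (l.getD i ' ') = pvV l i from rfl]
    have hlt : pvV l i < pvV l j0 := by
      obtain ⟨m, hm1, hm2, hm3, hm4⟩ := hg
      have := hR.2.2.2.1 m (by omega) hm2 hm3
      omega
    rw [pvInnerA_correct_some i j0 (by omega) (hpref i le_rfl) hR hlt]
  | succ k ih =>
    rcases Nat.lt_or_ge i i0 with hlt | hge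
    · rw [PySem.List.pyRange_one_cons (by omega)]
      unfold pvOuterA
      rw [PySem.List.pyGetD_natCast]
      rw [show pvDigVal (l.getD i ' ') = pvV l i from rfl]
      rw [pvInnerA_correct_none i (by omega) (hpref i (by omega)) (hmin i hlt)]
      have : (i : Int) + 1 = ((i + 1 : Nat) : Int) := by omega
      rw [this]
      exact ih (i+1) (by omega) (by omega)
    · exact ih i hii (by omega)

-- ---- first loop of B ----

-- best[k] describes the digit suffix after k
def pvBestSpec (l : List Char) (best : List Int) (k : Nat) : Prop :=
  (PySem.List.pyGetD best (k : Int) (-1) = -1 ∧ ∀ m, k < m → m < l.length → ¬ pvDigAt l m) ∨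
  (∃ j : Nat, PySem.List.pyGetD best (k : Int) (-1) = (j : Int) ∧ pvRArg l (k+1) j)

-- loop invariant: b is the rightmost largest digit index in [t, n) (or -1), entries ≥ t are set
def pvBInv (l : List Char) (t : Nat) (st : List Int × Int) : Prop :=
  st.1.length = l.length ∧
  ((st.2 = -1 ∧ ∀ m, t ≤ m → m < l.length → ¬ pvDigAt l m) ∨
   (∃ j : Nat, st.2 = (j : Int) ∧ pvRArg l t j)) ∧
  (∀ k, t ≤ k → k < l.length → pvBestSpec l st.1 k)

lemma pvGetD_set_self (best : List Int) (t : Nat) (b : Int) (ht : t < best.length) :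
    PySem.List.pyGetD (best.set t b) (t : Int) (-1) = b := by
  rw [PySem.List.pyGetD_natCast]
  rw [List.getD_eq_getElem?_getD, List.getElem?_set_self (by omega)]
  rfl

lemma pvGetD_set_ne (best : List Int) (t k : Nat) (b : Int) (hne : t ≠ k) :
    PySem.List.pyGetD (best.set t b) (k : Int) (-1) = PySem.List.pyGetD best (k : Int) (-1) := by
  rw [PySem.List.pyGetD_natCast, PySem.List.pyGetD_natCast]
  rw [List.getD_eq_getElem?_getD, List.getD_eq_getElem?_getD, List.getElem?_set_ne hne]

lemma pvBStep {l : List Char} (t : Nat) (best : List Int) (b : Int)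
    (hn : t < l.length) (hInv : pvBInv l (t+1) (best, b)) :
    pvBInv l t
      (let best' := best.set ((t : Int)).toNat b
       let c := PySem.List.pyGetD l (t : Int) ' '
       if PySem.Chars.isdigit c && ((b == -1) || decide (PySem.List.pyGetD l b ' ' < c)) then
         (best', (t : Int))
       else (best', b)) := by
  obtain ⟨hlen, hb, hbs⟩ := hInv
  simp only at hlen hb hbs
  have htN : ((t : Int)).toNat = t := by omega
  rw [htN, PySem.List.pyGetD_natCast]
  have hspec_t : pvBestSpec l (best.set t b) t := by
    unfold pvBestSpec
    rw [pvGetD_set_self best t b (by omega)]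
    rcases hb with ⟨hb1, hb2⟩ | ⟨j, hbj, hR⟩
    · exact Or.inl ⟨hb1, fun m hm1 hm2 => hb2 m (by omega) hm2⟩
    · exact Or.inr ⟨j, hbj, hR⟩
  have hspec_gt : ∀ k, t + 1 ≤ k → k < l.length → pvBestSpec l (best.set t b) k := by
    intro k hk1 hk2
    unfold pvBestSpec
    rw [pvGetD_set_ne best t k b (by omega)]
    exact hbs k hk1 hk2
  have hspec : ∀ k, t ≤ k → k < l.length → pvBestSpec l (best.set t b) k := by
    intro k hk1 hk2
    rcases Nat.eq_or_lt_of_le hk1 with h | h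
    · subst h; exact hspec_t
    · exact hspec_gt k h hk2
  by_cases hcond : (PySem.Chars.isdigit (l.getD t ' ') &&
      ((b == -1) || decide (PySem.List.pyGetD l b ' ' < l.getD t ' '))) = true
  · rw [if_pos hcond]
    simp only [Bool.and_eq_true, Bool.or_eq_true, beq_iff_eq, decide_eq_true_eq] at hcond
    obtain ⟨hdigt, hor⟩ := hcond
    have hdt : pvDigAt l t := (pvIsdigit_iff l t).mp hdigt
    refine ⟨by simpa using hlen, Or.inr ⟨t, rfl, le_rfl, hn, hdt, ?_, ?_⟩, hspec⟩
    · intro k hk1 hk2 hdk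
      rcases Nat.eq_or_lt_of_le hk1 with h | h
      · subst h; exact le_rfl
      · rcases hb with ⟨hb1, hb2⟩ | ⟨j, hbj, hR⟩
        · exact absurd hdk (hb2 k h hk2)
        · have hmax := hR.2.2.2.1 k h hk2 hdk
          rcases hor with h1 | h1
          · rw [h1] at hbj; omega
          · rw [hbj, PySem.List.pyGetD_natCast] at h1
            rw [pvCharLt_V] at h1
            omega
    · intro k hk1 hk2 hdk
      rcases hb with ⟨hb1, hb2⟩ | ⟨j, hbj, hR⟩
      · exact absurd hdk (hb2 k (by omega) hk2)
      · have hmax := hR.2.2.2.1 k (by omega) hk2 hdk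
        rcases hor with h1 | h1
        · rw [h1] at hbj; omega
        · rw [hbj, PySem.List.pyGetD_natCast] at h1
          rw [pvCharLt_V] at h1
          omega
  · rw [if_neg hcond]
    simp only [Bool.and_eq_true, Bool.or_eq_true, beq_iff_eq, decide_eq_true_eq, not_and, not_or] at hcond
    refine ⟨by simpa using hlen, ?_, hspec⟩
    by_cases hdigt : PySem.Chars.isdigit (l.getD t ' ') = true
    · -- t is a digit but does not beat b: b ≠ -1 and s[b] ≥ s[t]
      obtain ⟨hbne, hnlt⟩ := hcond hdigt
      have hdt : pvDigAt l t := (pvIsdigit_iff l t).mp hdigt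
      rcases hb with ⟨hb1, _⟩ | ⟨j, hbj, hR⟩
      · exact absurd hb1 hbne
      · refine Or.inr ⟨j, hbj, by have := hR.1; omega, hR.2.1, hR.2.2.1, ?_, ?_⟩
        · intro k hk1 hk2 hdk
          rcases Nat.eq_or_lt_of_le hk1 with h | h
          · subst h
            rw [hbj, PySem.List.pyGetD_natCast] at hnlt
            rw [pvCharLt_V] at hnlt
            omega
          · exact hR.2.2.2.1 k h hk2 hdk
        · intro k hk1 hk2 hdk
          exact hR.2.2.2.2 k hk1 hk2 hdk
    · -- t is not a digit: b and its meaning carry over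
      have hndt : ¬ pvDigAt l t := fun h => hdigt ((pvIsdigit_iff l t).mpr h)
      rcases hb with ⟨hb1, hb2⟩ | ⟨j, hbj, hR⟩
      · refine Or.inl ⟨hb1, ?_⟩
        intro m hm1 hm2
        rcases Nat.eq_or_lt_of_le hm1 with h | h
        · subst h; exact hndt
        · exact hb2 m h hm2
      · refine Or.inr ⟨j, hbj, by have := hR.1; omega, hR.2.1, hR.2.2.1, ?_, hR.2.2.2.2⟩
        intro k hk1 hk2 hdk
        rcases Nat.eq_or_lt_of_le hk1 with h | h
        · subst h; exact absurd hdk hndt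
        · exact hR.2.2.2.1 k h hk2 hdk

lemma pvBuildBest_inv {l : List Char} (t : Nat) (st : List Int × Int)
    (hn : t < l.length) (hInv : pvBInv l (t+1) st) :
    pvBInv l 0 (pvBuildBest l (PySem.List.pyRange (t : Int) (-1) (-1)) st) := by
  induction t generalizing st with
  | zero =>
    simp only [Nat.cast_zero]
    rw [PySem.List.pyRange_neg_one_cons (by omega : (-1 : Int) < 0),
        PySem.List.pyRange_neg_one_eq_nil (by omega : (0:Int) - 1 ≤ -1)]
    obtain ⟨best, b⟩ := st
    have hstep := pvBStep 0 best b hn hInv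
    simp only [Nat.cast_zero] at hstep
    simp only [pvBuildBest]
    split_ifs at hstep ⊢ <;> exact hstep
  | succ t ih =>
    rw [PySem.List.pyRange_neg_one_cons (by push_cast; omega : (-1 : Int) < ((t+1 : Nat) : Int))]
    obtain ⟨best, b⟩ := st
    have hstep := pvBStep (t+1) best b hn hInv
    have hcast : ((t+1 : Nat) : Int) - 1 = (t : Int) := by push_cast; omega
    simp only at hstep
    simp only [pvBuildBest, hcast]
    split_ifs at hstep ⊢ <;> exact ih _ (by omega) hstep

-- ---- second loop of B ----

lemma pvScanB_none (s0 : String) {l : List Char} {best : List Int}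
    (hbs : ∀ k, k < l.length → pvBestSpec l best k)
    (hng : ∀ k, k < l.length → ¬ pvGood l k) (i : Nat) :
    pvScanB s0 l best (PySem.List.pyRange (i : Int) (l.length : Int) 1) = s0 := by
  have hk : ∃ k : Nat, (l.length : Int) - i ≤ (k : Int) := ⟨l.length, by omega⟩
  obtain ⟨k, hkk⟩ := hk
  induction k generalizing i with
  | zero =>
    rw [PySem.List.pyRange_one_eq_nil (by omega)]
    rfl
  | succ k ih =>
    rcases Nat.lt_or_ge i l.length with hlt | hge
    · rw [PySem.List.pyRange_one_cons (by omega)]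
      simp only [pvScanB]
      rw [if_neg ?cond]
      case cond =>
        rintro ⟨hne, hlt2⟩
        rcases hbs i hlt with ⟨hj, _⟩ | ⟨j, hj, hR⟩
        · exact hne hj
        · rw [hj, PySem.List.pyGetD_natCast, PySem.List.pyGetD_natCast] at hlt2
          obtain ⟨hja, hjb, hjc, _, _⟩ := hR
          exact hng i hlt ⟨j, by omega, hjb, hjc, hlt2⟩
      have : (i : Int) + 1 = ((i + 1 : Nat) : Int) := by omega
      rw [this]
      exact ih (i+1) (by omega)
    · rw [PySem.List.pyRange_one_eq_nil (by omega)]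
      rfl

lemma pvScanB_some (s0 : String) {l : List Char} {best : List Int} (i0 j0 : Nat)
    (hbs : ∀ k, k < l.length → pvBestSpec l best k)
    (hmin : ∀ k, k < i0 → ¬ pvGood l k) (hg : pvGood l i0)
    (hR : pvRArg l (i0+1) j0)
    (i : Nat) (hii : i ≤ i0) :
    pvScanB s0 l best (PySem.List.pyRange (i : Int) (l.length : Int) 1) =
      String.ofList (pvSwap l (i0 : Int) (j0 : Int)) := by
  have hi0n : i0 < l.length := by
    obtain ⟨m, hm1, hm2, _⟩ := hg
    omega
  have hk : ∃ k : Nat, i0 - i ≤ k := ⟨i0, by omega⟩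
  obtain ⟨k, hkk⟩ := hk
  induction k generalizing i with
  | zero =>
    have : i = i0 := by omega
    subst this
    rw [PySem.List.pyRange_one_cons (by omega)]
    simp only [pvScanB]
    rcases hbs i hi0n with ⟨hj, hnd⟩ | ⟨j, hj, hR'⟩
    · exfalso
      obtain ⟨m, hm1, hm2, hm3, _⟩ := hg
      exact hnd m hm1 hm2 hm3
    · have hjj0 : j = j0 := pvRArg_unique hR' hR
      rw [hjj0] at hj
      rw [hj]
      rw [if_pos ?cond]
      case cond =>
        refine ⟨by omega, ?_⟩
        rw [PySem.List.pyGetD_natCast, PySem.List.pyGetD_natCast]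
        obtain ⟨m, hm1, hm2, hm3, hm4⟩ := hg
        have := hR.2.2.2.1 m (by omega) hm2 hm3
        have hVi : pvDigVal (l.getD i ' ') = pvV l i := rfl
        have hVj : pvDigVal (l.getD j0 ' ') = pvV l j0 := rfl
        omega
  | succ k ih =>
    rcases Nat.lt_or_ge i i0 with hlt | hge
    · rw [PySem.List.pyRange_one_cons (by omega)]
      simp only [pvScanB]
      rw [if_neg ?cond]
      case cond =>
        rintro ⟨hne, hlt2⟩
        rcases hbs i (by omega) with ⟨hj, _⟩ | ⟨j, hj, hR'⟩
        · exact hne hj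
        · rw [hj, PySem.List.pyGetD_natCast, PySem.List.pyGetD_natCast] at hlt2
          obtain ⟨hja, hjb, hjc, _, _⟩ := hR'
          exact hmin i hlt ⟨j, by omega, hjb, hjc, hlt2⟩
      have : (i : Int) + 1 = ((i + 1 : Nat) : Int) := by omega
      rw [this]
      exact ih (i+1) (by omega) (by omega)
    · exact ih i hii (by omega)

-- ---- the precondition, read propositionally ----

lemma pvPre_cases {s : String} (hpre : Pre_largestSwap s) :
    (∀ k, k < s.toList.length → pvDigAt s.toList k) ∨
    (∃ i, i < s.toList.length ∧ (∀ k, k ≤ i → pvDigAt s.toList k) ∧ pvGood s.toList i) := by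
  unfold Pre_largestSwap at hpre
  rw [Bool.or_eq_true] at hpre
  rcases hpre with h | h
  · left
    intro k hk
    have hmem : s.toList.getD k ' ' ∈ s.toList := by
      rw [List.getD_eq_getElem?_getD, List.getElem?_eq_getElem hk]
      exact List.getElem_mem hk
    exact (pvIsdigit_iff s.toList k).mp (List.all_eq_true.mp h _ hmem)
  · right
    obtain ⟨i, hi, hcond⟩ := List.any_eq_true.mp h
    rw [List.mem_range] at hi
    simp only [Bool.and_eq_true] at hcond
    obtain ⟨hpref, hany⟩ := hcond
    obtain ⟨m, hm, hmc⟩ := List.any_eq_true.mp hany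
    rw [List.mem_range] at hm
    simp only [Bool.and_eq_true, decide_eq_true_eq] at hmc
    obtain ⟨⟨him, hdm⟩, hlt⟩ := hmc
    refine ⟨i, hi, ?_, m, him, hm, (pvIsdigit_iff s.toList m).mp hdm, ?_⟩
    · intro k hk
      exact (pvIsdigit_iff s.toList k).mp
        (List.all_eq_true.mp hpref k (by rw [List.mem_range]; omega))
    · rw [← pvCharLt_V]
      exact hlt

lemma pvBInv_top (l : List Char) :
    pvBInv l l.length (List.replicate l.length (-1), -1) := by
  refine ⟨by simp, Or.inl ⟨rfl, fun m hm1 hm2 => by omega⟩, fun k hk1 hk2 => by omega⟩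

-- ===== VERDICT (by name: the statement is the Claim_ definition above) =====
theorem largestSwap_spec : Claim_equal_largestSwap := by
  classical
  intro s _hdom hpre
  unfold Spec_largestSwap
  show pvOuterA s.toList (pvLastPos s.toList) (PySem.List.pyRange 0 (s.toList.length : Int) 1) =
    (match pvBuildBest s.toList (PySem.List.pyRange (PySem.Str.len s - 1) (-1) (-1))
        (List.replicate (PySem.Str.len s).toNat (-1), -1) with
     | (best, _) => pvScanB s s.toList best (PySem.List.pyRange 0 (PySem.Str.len s) 1))
  have hlen : PySem.Str.len s = (s.toList.length : Int) := rfl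
  set l := s.toList with hl
  rw [hlen]
  rw [show ((l.length : Int)).toNat = l.length from by omega]
  have hInv0 : pvBInv l 0
      (pvBuildBest l (PySem.List.pyRange ((l.length : Int) - 1) (-1) (-1))
        (List.replicate l.length (-1), -1)) := by
    rcases Nat.eq_zero_or_pos l.length with h0 | hpos
    · rw [h0]
      rw [PySem.List.pyRange_neg_one_eq_nil (by omega)]
      have := pvBInv_top l
      rw [h0] at this
      exact this
    · rw [show ((l.length : Int) - 1) = ((l.length - 1 : Nat) : Int) from by omega]
      apply pvBuildBest_inv (l.length - 1) _ (by omega)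
      rw [show l.length - 1 + 1 = l.length from by omega]
      exact pvBInv_top l
  rcases hbb : pvBuildBest l (PySem.List.pyRange ((l.length : Int) - 1) (-1) (-1))
      (List.replicate l.length (-1), -1) with ⟨best, bfin⟩
  rw [hbb] at hInv0
  obtain ⟨hlenb, _, hbs0⟩ := hInv0
  simp only at hbs0
  have hbs : ∀ k, k < l.length → pvBestSpec l best k := fun k hk => hbs0 k (Nat.zero_le _) hk
  have hpc := pvPre_cases hpre
  rw [← hl] at hpc
  have hzero : ((0 : Nat) : Int) = 0 := rfl
  by_cases hex : ∃ k, k < l.length ∧ pvGood l k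
  · -- an improving swap exists; both sides swap the same pair
    obtain ⟨kw, hkw⟩ := hex
    have hP : ∃ k, k < l.length ∧ pvGood l k := ⟨kw, hkw⟩
    let i0 := Nat.find hP
    have hi0 := Nat.find_spec hP
    have hmin : ∀ k, k < i0 → ¬ pvGood l k := by
      intro k hk hg
      rcases Nat.lt_or_ge k l.length with h | h
      · exact Nat.find_min hP hk ⟨h, hg⟩
      · obtain ⟨m, hm1, hm2, _⟩ := hg; omega
    have hpref : ∀ k, k ≤ i0 → pvDigAt l k := by
      rcases hpc with h | ⟨i, hi, hprefi, hgi⟩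
      · intro k hk; exact h k (by omega)
      · intro k hk
        have : i0 ≤ i := by
          by_contra hc
          exact hmin i (by omega) hgi
        exact hprefi k (by omega)
    rcases hbs i0 hi0.1 with ⟨hj, hnd⟩ | ⟨j0, hj, hR⟩
    · exfalso
      obtain ⟨m, hm1, hm2, hm3, _⟩ := hi0.2
      exact hnd m hm1 hm2 hm3
    · have hAs := pvOuterA_some i0 j0 hmin hpref hi0.2 hR 0 (Nat.zero_le _)
      rw [hzero] at hAs
      rw [hAs]
      have hBs := pvScanB_some s i0 j0 hbs hmin hi0.2 hR 0 (Nat.zero_le _)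
      rw [hzero] at hBs
      exact hBs.symm
  · -- no improving swap: both sides return the input string
    have hng : ∀ k, k < l.length → ¬ pvGood l k := fun k hk hg => hex ⟨k, hk, hg⟩
    have hall : ∀ k, k < l.length → pvDigAt l k ∧ ¬ pvGood l k := by
      rcases hpc with h | ⟨i, hi, _, hgi⟩
      · exact fun k hk => ⟨h k hk, hng k hk⟩
      · exact absurd hgi (hng i hi)
    have hA := pvOuterA_none hall 0
    rw [hzero] at hA
    rw [hA, hl, String.ofList_toList]
    have hB := pvScanB_none s hbs hng 0
    rw [hzero] at hB
    exact hB.symm
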